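-- pv_equiv track=rewrite | github.com/LK-Tmac1/DellWarranty | src/py/svc_process.py | classify_svctags
-- ===== SOURCE A (Python) =====
-- def classify_svctags(all_svc_S, history_valid_svc_S, history_dellasset_S):
-- 	# classify those valid and invalid svctags, and also those svctag already in output
-- 	unknown_S = set([])
-- 	valid_S = set([])
-- 	existing_S = set([])
-- 	for svc in all_svc_S:
-- 		# First check whether there is a historical Dell Asset of this svc so as to reduce work load
-- 		target_S = existing_S if svc in history_dellasset_S else (valid_S if svc in history_valid_svc_S else unknown_S)
-- 		target_S.add(svc)
-- 	return unknown_S, valid_S, existing_S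
-- ===== SOURCE B (Python) =====
-- def classify_svctags(all_svc_S, history_valid_svc_S, history_dellasset_S):
--     s = set(all_svc_S)
--     existing_S = s & set(history_dellasset_S)
--     valid_S = (s & set(history_valid_svc_S)) - existing_S
--     unknown_S = s - existing_S - valid_S
--     return unknown_S, valid_S, existing_S
-- ===== Notes on version B (the rewrite author's own statement) =====
-- stated objective: simpler
-- what changed: Replaces the per-element classifying loop with three bulk set operations (intersection and difference) on set(all_svc_S), preserving the dellasset-over-valid-over-unknown priority.
import Mathlib
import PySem

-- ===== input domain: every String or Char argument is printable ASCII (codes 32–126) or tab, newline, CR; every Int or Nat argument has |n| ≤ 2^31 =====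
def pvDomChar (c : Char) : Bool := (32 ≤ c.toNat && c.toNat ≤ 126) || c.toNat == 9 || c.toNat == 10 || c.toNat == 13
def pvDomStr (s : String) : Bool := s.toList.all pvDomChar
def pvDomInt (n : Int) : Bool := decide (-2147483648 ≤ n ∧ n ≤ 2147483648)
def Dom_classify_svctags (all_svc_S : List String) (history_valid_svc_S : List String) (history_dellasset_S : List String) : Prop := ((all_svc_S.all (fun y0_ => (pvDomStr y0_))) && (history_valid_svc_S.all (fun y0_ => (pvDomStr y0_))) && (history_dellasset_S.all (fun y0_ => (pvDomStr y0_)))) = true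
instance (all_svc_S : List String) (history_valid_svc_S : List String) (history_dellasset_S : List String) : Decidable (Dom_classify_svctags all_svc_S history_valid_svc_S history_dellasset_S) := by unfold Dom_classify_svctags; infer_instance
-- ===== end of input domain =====

-- B replaces A's per-element classifying loop by three bulk set operations
-- (intersection / difference), for a simpler, more declarative implementation.


-- ===== PORT A =====
-- One pass over all_svc_S; each svc is added to existing / valid / unknown by the
-- same dellasset-first, valid-second priority as A's conditional expression.
def classify_svctags (all_svc_S : List String) (history_valid_svc_S : List String) (history_dellasset_S : List String) : List String × List String × List String :=
  let r := all_svc_S.foldl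
    (fun (st : PySem.Set String × PySem.Set String × PySem.Set String) svc =>
      if history_dellasset_S.contains svc then (st.1, st.2.1, PySem.Set.add st.2.2 svc)
      else if history_valid_svc_S.contains svc then (st.1, PySem.Set.add st.2.1 svc, st.2.2)
      else (PySem.Set.add st.1 svc, st.2.1, st.2.2))
    (PySem.Set.empty, PySem.Set.empty, PySem.Set.empty)
  (r.1, r.2.1, r.2.2)

-- ===== PORT B =====
-- s = set(all); existing = s & set(dell); valid = (s & set(validh)) - existing;
-- unknown = s - existing - valid.
def classify_svctags_alt (all_svc_S : List String) (history_valid_svc_S : List String) (history_dellasset_S : List String) : List String × List String × List String :=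
  let s := PySem.Set.ofList all_svc_S
  let existing := PySem.Set.inter s (PySem.Set.ofList history_dellasset_S)
  let valid := PySem.Set.diff (PySem.Set.inter s (PySem.Set.ofList history_valid_svc_S)) existing
  let unknown := PySem.Set.diff (PySem.Set.diff s existing) valid
  (unknown, valid, existing)

-- ===== PRECONDITION & SPEC =====
def Spec_classify_svctags (all_svc_S : List String) (history_valid_svc_S : List String) (history_dellasset_S : List String) (out : List String × List String × List String) : Prop := out = classify_svctags_alt all_svc_S history_valid_svc_S history_dellasset_S
instance (all_svc_S : List String) (history_valid_svc_S : List String) (history_dellasset_S : List String) (out : List String × List String × List String) : Decidable (Spec_classify_svctags all_svc_S history_valid_svc_S history_dellasset_S out) := by unfold Spec_classify_svctags; infer_instance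

-- ===== CLAIM (what is proved, stated in full; the proofs are below) =====
def Claim_equal_classify_svctags : Prop := ∀ (all_svc_S : List String) (history_valid_svc_S : List String) (history_dellasset_S : List String), Dom_classify_svctags all_svc_S history_valid_svc_S history_dellasset_S → Spec_classify_svctags all_svc_S history_valid_svc_S history_dellasset_S (classify_svctags all_svc_S history_valid_svc_S history_dellasset_S)

-- ===== LEMMAS AND PROOFS =====

-- A's loop, characterised: each of the three accumulators is updated with the
-- sublist of l selected by its (disjoint) classifying predicate.
theorem pv_fold_char (v d : List String) (l : List String)
    (u vs e : PySem.Set String) :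
    l.foldl
      (fun (st : PySem.Set String × PySem.Set String × PySem.Set String) svc =>
        if d.contains svc then (st.1, st.2.1, PySem.Set.add st.2.2 svc)
        else if v.contains svc then (st.1, PySem.Set.add st.2.1 svc, st.2.2)
        else (PySem.Set.add st.1 svc, st.2.1, st.2.2))
      (u, vs, e)
    = (PySem.Set.update u (l.filter (fun x => !d.contains x && !v.contains x)),
       PySem.Set.update vs (l.filter (fun x => !d.contains x && v.contains x)),
       PySem.Set.update e (l.filter (fun x => d.contains x))) := by
  induction l generalizing u vs e with
  | nil => simp [PySem.Set.update]
  | cons x l ih =>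
    rw [List.foldl_cons]
    cases hd : d.contains x with
    | true =>
      rw [if_pos rfl, ih]
      have hd' : x ∈ d := by simpa using hd
      simp [hd', PySem.Set.update_cons]
    | false =>
      rw [if_neg (by simp)]
      have hd' : x ∉ d := by simpa using hd
      cases hv : v.contains x with
      | true =>
        rw [if_pos rfl, ih]
        have hv' : x ∈ v := by simpa using hv
        simp [hd', hv', PySem.Set.update_cons]
      | false =>
        rw [if_neg (by simp), ih]
        have hv' : x ∉ v := by simpa using hv
        simp [hd', hv', PySem.Set.update_cons]

-- set(l) of a filtered list is the filtered set(l).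
theorem pv_ofList_filter (p : String → Bool) (l : List String) :
    PySem.Set.ofList (l.filter p) = (PySem.Set.ofList l).filter p := by
  induction l with
  | nil => simp [PySem.Set.ofList, PySem.Set.empty]
  | cons x l ih =>
    rw [List.filter_cons]
    by_cases hp : p x
    · rw [if_pos hp, PySem.Set.ofList_cons, PySem.Set.ofList_cons, ih]
      simp only [PySem.Set.discard, List.filter_cons, hp, if_pos, List.filter_filter]
      congr 1
      exact List.filter_congr (fun y _ => by rw [Bool.and_comm])
    · rw [if_neg hp, PySem.Set.ofList_cons, ih]
      simp only [PySem.Set.discard, List.filter_cons, hp]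
      rw [List.filter_filter]
      refine (List.filter_congr fun y _ => ?_).symm
      by_cases hyx : y = x
      · subst hyx; simp [hp]
      · simp [hyx]

-- ===== VERDICT (by name: the statement is the Claim_ definition above) =====
theorem classify_svctags_spec : Claim_equal_classify_svctags := by
  intro a v d _
  unfold Spec_classify_svctags classify_svctags classify_svctags_alt
  rw [pv_fold_char]
  have hnil : ∀ xs : List String, PySem.Set.update PySem.Set.empty xs = PySem.Set.ofList xs := fun _ => rfl
  simp only [PySem.Set.inter, PySem.Set.diff, hnil]
  rw [pv_ofList_filter, pv_ofList_filter, pv_ofList_filter]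
  simp only [List.filter_filter]
  simp only [Prod.mk.injEq]
  refine ⟨?_, ?_, ?_⟩
  all_goals refine List.filter_congr fun x hx => ?_
  all_goals rw [Bool.eq_iff_iff]
  all_goals simp only [Bool.and_eq_true, Bool.not_eq_true', PySem.Set.contains,
    List.contains_eq_mem, decide_eq_true_eq, decide_eq_false_iff_not, List.mem_filter,
    PySem.Set.mem_ofList]
  all_goals have hxa : x ∈ a := (PySem.Set.mem_ofList a x).mp hx
  all_goals constructor
  all_goals intro h
  all_goals simp_all
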